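-- pv_equiv track=rewrite | github.com/zois-tasoulas/algoExpert | medium/taskAssignment.py | task_assignment
-- ===== SOURCE A (Python) =====
-- def task_assignment(workers, tasks):
--     task_id_pairs = list(zip(tasks, (index for index in range(len(tasks)))))
--
--     task_id_pairs.sort()
--     schedule = []
--     for worker in range(workers):
--         schedule.append(
--             [task_id_pairs[worker][1], task_id_pairs[2 * workers - worker - 1][1]]
--         )
--
--     return schedule
-- ===== SOURCE B (Python) =====
-- def task_assignment(workers, tasks):
--     # Selection instead of sorting: repeatedly extract the cheapest remaining
--     # task (min is the FIRST minimal, and `remaining` stays ascending, so ties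
--     # break on the smallest index); the first `workers` extractions are the low
--     # sides, the next `workers` (read backwards) are the high sides.
--     remaining = list(range(len(tasks)))
--     order = []
--     for _ in range(2 * workers):
--         low = min(remaining, key=lambda index: tasks[index])
--         remaining.remove(low)
--         order.append(low)
--     return [[order[w], order[2 * workers - 1 - w]] for w in range(workers)]
-- ===== Notes on version B (the rewrite author's own statement) =====
-- stated objective: alternative
-- what changed: B replaces A's sort of (duration, index) tuples by repeated selection: it extracts the cheapest remaining task 2*workers times (Python's min returns the first minimum, and the ascending remaining-index list makes ties break on the smallest index), then pairs the w-th extraction with the (2*workers-1-w)-th; no sort is performed.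
import Mathlib
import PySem

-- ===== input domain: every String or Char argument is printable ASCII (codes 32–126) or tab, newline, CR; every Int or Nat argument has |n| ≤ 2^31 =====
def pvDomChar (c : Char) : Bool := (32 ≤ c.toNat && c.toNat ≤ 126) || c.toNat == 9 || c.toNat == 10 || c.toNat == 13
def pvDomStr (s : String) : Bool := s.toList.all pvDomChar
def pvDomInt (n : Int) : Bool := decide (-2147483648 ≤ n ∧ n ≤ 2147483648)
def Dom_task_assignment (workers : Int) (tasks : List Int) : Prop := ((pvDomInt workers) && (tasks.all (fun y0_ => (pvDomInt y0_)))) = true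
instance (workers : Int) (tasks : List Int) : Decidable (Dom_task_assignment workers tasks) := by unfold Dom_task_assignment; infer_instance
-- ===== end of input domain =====

-- B replaces A's sort of (duration, index) tuples by repeated selection of the first
-- minimal remaining task (2*workers extractions, no sort): an alternative algorithm,
-- not claimed faster.

-- ===== PORT A =====
-- list indexing raises IndexError out of range; Pre_ keeps every index in range, so the
-- pyGetD default is never reached on admitted inputs.
def task_assignment (workers : Int) (tasks : List Int) : List (List Int) :=
  let task_id_pairs := tasks.zip (PySem.List.pyRange 0 (tasks.length : Int) 1)
  -- .sort() on 2-tuples of ints = stable sort by the lexicographic key (fst, snd)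
  let sorted_pairs := PySem.List.sorted2 task_id_pairs Prod.fst Prod.snd false
  (PySem.List.pyRange 0 workers 1).foldl
    (fun schedule worker =>
      schedule ++ [[(PySem.List.pyGetD sorted_pairs worker (0, 0)).2,
                    (PySem.List.pyGetD sorted_pairs (2 * workers - worker - 1) (0, 0)).2]]) []

-- ===== PORT B =====
-- min(remaining, key=…) = PySem.List.min? (first minimal element); Python raises
-- ValueError on an empty `remaining`, excluded by Pre_, so the .getD defaults are
-- never reached on admitted inputs.  remaining.remove(low) = PySem.List.remove?.
def task_assignment_alt (workers : Int) (tasks : List Int) : List (List Int) :=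
  let st := (PySem.List.pyRange 0 (2 * workers) 1).foldl
    (fun st _ =>
      let low := (PySem.List.min? st.1 (fun index => PySem.List.pyGetD tasks index 0)).getD 0
      ((PySem.List.remove? st.1 low).getD st.1, st.2 ++ [low]))
    (PySem.List.pyRange 0 (tasks.length : Int) 1, ([] : List Int))
  (PySem.List.pyRange 0 workers 1).map (fun w =>
    [PySem.List.pyGetD st.2 w 0, PySem.List.pyGetD st.2 (2 * workers - 1 - w) 0])

-- ===== PRECONDITION & SPEC =====
-- Exactly the inputs where Python A returns: with workers > 0 the index 2*workers-1 must
-- exist, otherwise A raises IndexError (and B raises ValueError at the same inputs).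
def Pre_task_assignment (workers : Int) (tasks : List Int) : Prop :=
  workers ≤ 0 ∨ 2 * workers ≤ (tasks.length : Int)
instance (workers : Int) (tasks : List Int) : Decidable (Pre_task_assignment workers tasks) := by
  unfold Pre_task_assignment; infer_instance
def pvWitness_task_assignment : Int × List Int := (2, [3, 1, 4, 1])

def Spec_task_assignment (workers : Int) (tasks : List Int) (out : List (List Int)) : Prop := out = task_assignment_alt workers tasks
instance (workers : Int) (tasks : List Int) (out : List (List Int)) : Decidable (Spec_task_assignment workers tasks out) := by unfold Spec_task_assignment; infer_instance

-- ===== CLAIM (what is proved, stated in full; the proofs are below) =====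
def Claim_equal_task_assignment : Prop := ∀ (workers : Int) (tasks : List Int), Dom_task_assignment workers tasks → Pre_task_assignment workers tasks → Spec_task_assignment workers tasks (task_assignment workers tasks)

-- ===== LEMMAS AND PROOFS =====

-- the non-strict lexicographic order Python's tuple sort realises on (duration, index) pairs
def pvLe (a b : Int × Int) : Prop := a.1 < b.1 ∨ (a.1 = b.1 ∧ a.2 ≤ b.2)

-- the Bool comparison sorted2 pairs Prod.fst Prod.snd uses
def pvB (a b : Int × Int) : Bool := decide (a.1 < b.1) || (!decide (b.1 < a.1) && decide (a.2 < b.2))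

theorem pvB_true {a b : Int × Int} (h : pvB a b = true) : pvLe a b := by
  unfold pvB at h; unfold pvLe
  simp only [Bool.or_eq_true, Bool.and_eq_true, Bool.not_eq_true', decide_eq_true_eq,
    decide_eq_false_iff_not] at h
  omega

theorem pvB_false {a b : Int × Int} (h : pvB a b = false) : pvLe b a := by
  unfold pvB at h; unfold pvLe
  simp only [Bool.or_eq_false_iff, Bool.and_eq_false_iff, decide_eq_false_iff_not,
    Bool.not_eq_false', decide_eq_true_eq] at h
  omega

theorem pv_insertBy_nil (x : Int × Int) : PySem.List.insertBy pvB x [] = [x] := rfl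

theorem pv_insertBy_cons (x y : Int × Int) (ys : List (Int × Int)) :
    PySem.List.insertBy pvB x (y :: ys)
      = if pvB x y then x :: y :: ys else y :: PySem.List.insertBy pvB x ys := rfl

theorem pv_insertBy_pairwise (x : Int × Int) :
    ∀ (acc : List (Int × Int)), acc.Pairwise pvLe →
      (PySem.List.insertBy pvB x acc).Pairwise pvLe := by
  intro acc
  induction acc with
  | nil => intro _; rw [pv_insertBy_nil]; exact List.pairwise_singleton pvLe x
  | cons y ys ih =>
    intro h
    rcases List.pairwise_cons.1 h with ⟨hy, hys⟩
    rw [pv_insertBy_cons]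
    by_cases hb : pvB x y = true
    · rw [if_pos hb]
      refine List.pairwise_cons.2 ⟨?_, h⟩
      intro z hz
      rcases List.mem_cons.1 hz with rfl | hz
      · exact pvB_true hb
      · have hxy := pvB_true hb
        have hyz := hy z hz
        unfold pvLe at *; omega
    · have hb' : pvB x y = false := by simpa using hb
      rw [if_neg (by simp [hb'])]
      refine List.pairwise_cons.2 ⟨?_, ih hys⟩
      intro z hz
      rcases (PySem.List.mem_insertBy pvB x z ys).1 hz with rfl | hz
      · exact pvB_false hb'
      · exact hy z hz

theorem pv_foldl_insertBy_pairwise :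
    ∀ (l acc : List (Int × Int)), acc.Pairwise pvLe →
      (l.foldl (fun acc x => PySem.List.insertBy pvB x acc) acc).Pairwise pvLe := by
  intro l
  induction l with
  | nil => intro acc h; simpa using h
  | cons x t ih => intro acc h; exact ih _ (pv_insertBy_pairwise x acc h)

-- sorted2 with keys (fst, snd) is this very fold (definitional)
theorem pv_sorted2_eq (xs : List (Int × Int)) :
    PySem.List.sorted2 xs Prod.fst Prod.snd false
      = xs.foldl (fun acc x => PySem.List.insertBy pvB x acc) [] := rfl

-- A's zip(tasks, range(len(tasks))) is enumerate with the components swapped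
theorem pv_zip_range_eq_enumerate :
    ∀ (ts : List Int) (s : Int),
      ts.zip (PySem.List.pyRange s (s + (ts.length : Int)) 1)
        = (PySem.List.enumerate ts s).map (fun p => (p.2, p.1)) := by
  intro ts
  induction ts with
  | nil => intro s; simp [PySem.List.enumerate]
  | cons x t ih =>
    intro s
    rw [PySem.List.pyRange_one_cons (by push_cast [List.length_cons]; omega)]
    have h1 : s + ((x :: t).length : Int) = (s + 1) + (t.length : Int) := by
      push_cast [List.length_cons]; ring
    rw [h1, List.zip_cons_cons, PySem.List.enumerate_cons, List.map_cons, ih (s + 1)]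

-- B's per-index task duration, as the proofs name it
def pvT (tasks : List Int) (i : Int) : Int := PySem.List.pyGetD tasks i 0

-- the strict lexicographic order on indices under their duration
def pvKLt (tasks : List Int) (a b : Int) : Prop :=
  pvT tasks a < pvT tasks b ∨ (pvT tasks a = pvT tasks b ∧ a < b)

-- the running-minimum step of Python's min (strict `<` keeps the FIRST minimal element)
def pvPick (tasks : List Int) (m x : Int) : Int :=
  if pvT tasks x < pvT tasks m then x else m

-- on an ascending index list the running fold lands on the lexicographic
-- (duration, index) minimum
theorem pv_fold_min (tasks : List Int) :
    ∀ (rem : List Int) (m0 : Int), (m0 :: rem).Pairwise (· < ·) →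
      (rem.foldl (pvPick tasks) m0) ∈ m0 :: rem ∧
      ∀ y ∈ m0 :: rem, pvT tasks (rem.foldl (pvPick tasks) m0) < pvT tasks y ∨
        (pvT tasks (rem.foldl (pvPick tasks) m0) = pvT tasks y ∧
          rem.foldl (pvPick tasks) m0 ≤ y) := by
  intro rem
  induction rem with
  | nil =>
    intro m0 _
    simp only [List.foldl_nil]
    refine ⟨List.mem_cons_self, ?_⟩
    intro y hy
    rcases List.mem_cons.1 hy with rfl | hy
    · exact Or.inr ⟨rfl, le_refl _⟩
    · cases hy
  | cons x xs ih =>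
    intro m0 h
    rcases List.pairwise_cons.1 h with ⟨hm0, hxxs⟩
    rcases List.pairwise_cons.1 hxxs with ⟨hx, _⟩
    have hm0x : m0 < x := hm0 x List.mem_cons_self
    rw [List.foldl_cons]
    by_cases hc : pvT tasks x < pvT tasks m0
    · have hp : pvPick tasks m0 x = x := if_pos hc
      rw [hp]
      obtain ⟨hmem, hmin⟩ := ih x hxxs
      set f := xs.foldl (pvPick tasks) x with hfdef
      refine ⟨?_, ?_⟩
      · rcases List.mem_cons.1 hmem with h' | h'
        · rw [h']; exact List.mem_cons.2 (Or.inr List.mem_cons_self)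
        · exact List.mem_cons.2 (Or.inr (List.mem_cons.2 (Or.inr h')))
      · intro y hy
        rcases List.mem_cons.1 hy with rfl | hy
        · have h1 := hmin x List.mem_cons_self
          omega
        · exact hmin y hy
    · have hp : pvPick tasks m0 x = m0 := if_neg hc
      rw [hp]
      have hpx : (m0 :: xs).Pairwise (· < ·) := by
        refine List.pairwise_cons.2 ⟨?_, (List.pairwise_cons.1 hxxs).2⟩
        intro z hz
        exact hm0 z (List.mem_cons.2 (Or.inr hz))
      obtain ⟨hmem, hmin⟩ := ih m0 hpx
      set f := xs.foldl (pvPick tasks) m0 with hfdef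
      refine ⟨?_, ?_⟩
      · rcases List.mem_cons.1 hmem with h' | h'
        · rw [h']; exact List.mem_cons_self
        · exact List.mem_cons.2 (Or.inr (List.mem_cons.2 (Or.inr h')))
      · intro y hy
        rcases List.mem_cons.1 hy with rfl | hy
        · exact hmin _ List.mem_cons_self
        · rcases List.mem_cons.1 hy with rfl | hy
          · have h1 := hmin m0 List.mem_cons_self
            rcases List.mem_cons.1 hmem with h' | h'
            · rw [h'] at h1 ⊢; omega
            · have h2 := hx _ h'
              omega
          · exact hmin y (List.mem_cons.2 (Or.inr hy))

-- min? drops its first two elements to their running minimum (first minimal kept)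
theorem pv_min?_shift (tasks : List Int) (h0 x : Int) (xs : List Int) :
    PySem.List.min? (h0 :: x :: xs) (fun index => PySem.List.pyGetD tasks index 0)
      = PySem.List.min?
          ((if PySem.List.pyGetD tasks x 0 < PySem.List.pyGetD tasks h0 0 then x else h0) :: xs)
          (fun index => PySem.List.pyGetD tasks index 0) := by
  by_cases hc : PySem.List.pyGetD tasks x 0 < PySem.List.pyGetD tasks h0 0 <;>
    simp [PySem.List.min?, hc]

-- min? over a cons is the running fold seeded with the head
theorem pv_min?_cons (tasks : List Int) (h0 : Int) (tl : List Int) :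
    PySem.List.min? (h0 :: tl) (fun index => PySem.List.pyGetD tasks index 0)
      = some (tl.foldl (pvPick tasks) h0) := by
  induction tl generalizing h0 with
  | nil => rfl
  | cons x xs ih =>
    rw [pv_min?_shift tasks h0 x xs, ih, List.foldl_cons]
    rfl

-- one step of B's loop, named for the proofs
def pvStep (tasks : List Int) (st : List Int × List Int) : List Int × List Int :=
  let low := (PySem.List.min? st.1 (fun index => PySem.List.pyGetD tasks index 0)).getD 0
  ((PySem.List.remove? st.1 low).getD st.1, st.2 ++ [low])

-- a loop body that ignores the loop variable is function iteration
theorem pv_foldl_const {α β : Type} (f : α → α) :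
    ∀ (l : List β) (st : α), l.foldl (fun st _ => f st) st = f^[l.length] st := by
  intro l
  induction l with
  | nil => intro st; rfl
  | cons x t ih =>
    intro st
    rw [List.foldl_cons, ih, List.length_cons, Function.iterate_succ_apply]

-- the selection loop: if S is the strictly-lex-sorted permutation of the ascending
-- remaining list, k extractions append exactly S.take k to the order accumulator
theorem pv_loop_take (tasks : List Int) :
    ∀ (k : Nat) (rem ord S : List Int), rem.Pairwise (· < ·) → S.Perm rem →
      S.Pairwise (pvKLt tasks) → k ≤ rem.length →
      ((pvStep tasks)^[k] (rem, ord)).2 = ord ++ S.take k := by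
  intro k
  induction k with
  | zero => intro rem ord S _ _ _ _; simp
  | succ k ih =>
    intro rem ord S hrem hperm hS hk
    have hlen : S.length = rem.length := hperm.length_eq
    cases S with
    | nil => simp [← hlen] at hk
    | cons m S' =>
      have hmrem : m ∈ rem := hperm.mem_iff.1 List.mem_cons_self
      cases rem with
      | nil => cases hmrem
      | cons r0 rtl =>
        -- the extracted minimum is m
        rcases pv_fold_min tasks rtl r0 hrem with ⟨hmem, hmin⟩
        set f := rtl.foldl (pvPick tasks) r0 with hf
        have hmS : ∀ y ∈ r0 :: rtl, y = m ∨ pvKLt tasks m y := by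
          intro y hy
          rcases List.mem_cons.1 (hperm.mem_iff.2 hy) with rfl | hy'
          · exact Or.inl rfl
          · exact Or.inr ((List.pairwise_cons.1 hS).1 y hy')
        have hfm : f = m := by
          have h1 := hmin m hmrem
          rcases hmS f hmem with h2 | h2
          · exact h2
          · unfold pvKLt at h2; omega
        have hlow : (PySem.List.min? (r0 :: rtl)
            (fun index => PySem.List.pyGetD tasks index 0)).getD 0 = m := by
          rw [pv_min?_cons tasks r0 rtl, ← hf, hfm]; rfl
        have hstep : pvStep tasks (r0 :: rtl, ord) = ((r0 :: rtl).erase m, ord ++ [m]) := by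
          unfold pvStep
          simp only [hlow, PySem.List.remove?_eq_some_erase (r0 :: rtl) m hmrem, Option.getD_some]
        rw [Function.iterate_succ_apply, hstep]
        have hrem' : ((r0 :: rtl).erase m).Pairwise (· < ·) :=
          hrem.sublist List.erase_sublist
        have hperm' : S'.Perm ((r0 :: rtl).erase m) := by
          have := hperm.erase m
          rwa [List.erase_cons_head] at this
        have hS' : S'.Pairwise (pvKLt tasks) := (List.pairwise_cons.1 hS).2
        have hk' : k ≤ ((r0 :: rtl).erase m).length := by
          rw [List.length_erase_of_mem hmrem]
          simp only [List.length_cons] at hk ⊢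
          omega
        rw [ih _ _ _ hrem' hperm' hS' hk', List.take_succ_cons]
        simp

-- the sorted (duration, index) pair list of A: every member carries its own duration
theorem pv_pairs_mem (tasks : List Int) :
    ∀ q ∈ tasks.zip (PySem.List.pyRange 0 (tasks.length : Int) 1),
      0 ≤ q.2 ∧ q.2 < (tasks.length : Int) ∧ q.1 = pvT tasks q.2 := by
  have h := pv_zip_range_eq_enumerate tasks 0
  rw [(by simp : (0 : Int) + (tasks.length : Int) = (tasks.length : Int))] at h
  intro q hq
  rw [h] at hq
  rcases List.mem_map.1 hq with ⟨p, hp, rfl⟩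
  rcases (PySem.List.mem_enumerate_iff tasks 0 p).1 hp with ⟨j, hj, rfl⟩
  simp only [zero_add]
  refine ⟨Int.natCast_nonneg j, by exact_mod_cast hj, ?_⟩
  simp [pvT, PySem.List.pyGetD_natCast, hj]

-- B's extraction order target: the second components of A's sorted pair list
def pvS (tasks : List Int) : List Int :=
  (PySem.List.sorted2 (tasks.zip (PySem.List.pyRange 0 (tasks.length : Int) 1))
    Prod.fst Prod.snd false).map (fun p => p.2)

theorem pv_map_snd_pairs (tasks : List Int) :
    (tasks.zip (PySem.List.pyRange 0 (tasks.length : Int) 1)).map (fun p => p.2)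
      = PySem.List.pyRange 0 (tasks.length : Int) 1 := by
  have h := pv_zip_range_eq_enumerate tasks 0
  rw [(by simp : (0 : Int) + (tasks.length : Int) = (tasks.length : Int))] at h
  rw [h, List.map_map]
  have : ((fun p : Int × Int => p.2) ∘ (fun p : Int × Int => (p.2, p.1)))
      = (fun p : Int × Int => p.1) := rfl
  rw [this]
  have := PySem.List.map_fst_enumerate tasks 0
  simpa using this

theorem pv_S_perm (tasks : List Int) :
    (pvS tasks).Perm (PySem.List.pyRange 0 (tasks.length : Int) 1) := by
  unfold pvS
  refine ((PySem.List.sorted2_perm (tasks.zip (PySem.List.pyRange 0 (tasks.length : Int) 1))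
    Prod.fst Prod.snd false).map (fun p : Int × Int => p.2)).trans ?_
  exact List.Perm.of_eq (pv_map_snd_pairs tasks)

theorem pv_S_length (tasks : List Int) : (pvS tasks).length = tasks.length := by
  have h := (pv_S_perm tasks).length_eq
  rw [PySem.List.length_pyRange_one] at h
  omega

theorem pv_S_pairwise (tasks : List Int) : (pvS tasks).Pairwise (pvKLt tasks) := by
  have hsorted : (PySem.List.sorted2
      (tasks.zip (PySem.List.pyRange 0 (tasks.length : Int) 1)) Prod.fst Prod.snd
      false).Pairwise pvLe := by
    rw [pv_sorted2_eq]
    exact pv_foldl_insertBy_pairwise _ [] (by simp)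
  have hmemfact : ∀ q ∈ PySem.List.sorted2
      (tasks.zip (PySem.List.pyRange 0 (tasks.length : Int) 1)) Prod.fst Prod.snd false,
      q.1 = pvT tasks q.2 := by
    intro q hq
    exact (pv_pairs_mem tasks q ((PySem.List.sorted2_perm _ _ _ _).mem_iff.1 hq)).2.2
  have hnd : (pvS tasks).Nodup :=
    (pv_S_perm tasks).nodup_iff.2 (PySem.List.nodup_pyRange_one 0 (tasks.length : Int))
  have hpair : (pvS tasks).Pairwise (· ≠ ·) := hnd
  unfold pvS at hpair ⊢
  rw [List.pairwise_map] at hpair ⊢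
  refine (hsorted.and hpair).imp_of_mem ?_
  intro a b ha hb hab
  rcases hab with ⟨hle, hne⟩
  have h1 := hmemfact a ha
  have h2 := hmemfact b hb
  unfold pvLe at hle
  unfold pvKLt
  rw [h1, h2] at hle
  rcases hle with h | ⟨h, h'⟩
  · exact Or.inl h
  · exact Or.inr ⟨h, lt_of_le_of_ne h' hne⟩

-- ===== VERDICT (by name: the statement is the Claim_ definition above) =====
theorem task_assignment_spec : Claim_equal_task_assignment := by
  intro workers tasks _ hpre
  show task_assignment workers tasks = task_assignment_alt workers tasks
  by_cases hw : workers ≤ 0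
  · unfold task_assignment task_assignment_alt
    rw [PySem.List.pyRange_one_eq_nil hw]
    simp
  · have hw1 : (0 : Int) < workers := by omega
    have h2w : 2 * workers ≤ (tasks.length : Int) := by
      rcases hpre with h | h
      · omega
      · exact h
    unfold task_assignment task_assignment_alt
    dsimp only
    rw [PySem.List.foldl_append_singleton_eq_map]
    have hbody : (fun (st : List Int × List Int) (_ : Int) =>
        let low := (PySem.List.min? st.1 (fun index => PySem.List.pyGetD tasks index 0)).getD 0
        ((PySem.List.remove? st.1 low).getD st.1, st.2 ++ [low]))
          = (fun st (_ : Int) => pvStep tasks st) := rfl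
    rw [hbody, pv_foldl_const (pvStep tasks)]
    have hord : ((pvStep tasks)^[(PySem.List.pyRange 0 (2 * workers) 1).length]
        (PySem.List.pyRange 0 (tasks.length : Int) 1, ([] : List Int))).2
          = (pvS tasks).take (2 * workers).toNat := by
      rw [PySem.List.length_pyRange_one]
      have hk : (2 * workers - 0).toNat ≤ (PySem.List.pyRange 0 (tasks.length : Int) 1).length := by
        rw [PySem.List.length_pyRange_one]; omega
      rw [pv_loop_take tasks _ _ _ _ (PySem.List.pairwise_lt_pyRange_one 0 _)
        (pv_S_perm tasks) (pv_S_pairwise tasks) hk]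
      simp
    rw [hord]
    refine List.map_congr_left ?_
    intro w hwmem
    rcases (PySem.List.mem_pyRange_one).1 hwmem with ⟨hw0, hwlt⟩
    have hn : (PySem.List.sorted2 (tasks.zip (PySem.List.pyRange 0 (tasks.length : Int) 1))
        Prod.fst Prod.snd false).length = tasks.length := by
      have := pv_S_length tasks
      unfold pvS at this
      simpa using this
    have hlen2 : ((pvS tasks).take (2 * workers).toNat).length = (2 * workers).toNat := by
      rw [List.length_take, pv_S_length]
      omega
    have hidx : ∀ (i : Int), 0 ≤ i → i < 2 * workers →
        PySem.List.pyGetD ((pvS tasks).take (2 * workers).toNat) i 0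
          = (PySem.List.pyGetD (PySem.List.sorted2
              (tasks.zip (PySem.List.pyRange 0 (tasks.length : Int) 1))
              Prod.fst Prod.snd false) i (0, 0)).2 := by
      intro i h0 hi
      rw [PySem.List.pyGetD_eq_getElem ((pvS tasks).take (2 * workers).toNat) 0 h0
          (by rw [hlen2]; omega),
        PySem.List.pyGetD_eq_getElem _ (0, 0) h0 (by rw [hn]; omega)]
      rw [List.getElem_take]
      unfold pvS
      rw [List.getElem_map]
    have hix : 2 * workers - 1 - w = 2 * workers - w - 1 := by ring
    rw [hix, hidx w hw0 (by omega), hidx (2 * workers - w - 1) (by omega) (by omega)]
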